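-- pv_equiv track=rewrite | github.com/pHarith/AdventOfCode2024-Solutions | 14/day14sol.py | check_christmas_tree
-- ===== SOURCE A (Python) =====
-- MIN_CONSECUTIVE_ROWS = 7
--
-- MIN_CONSECUTIVE_ONES = 7
--
-- def check_christmas_tree(board):
--     consecutive_rows = 0
--     for row in board:
--         if check_consecutive_ones(row):
--             consecutive_rows += 1
--
--             # Check if there are 7 or more consecutive rows
--             if consecutive_rows >= MIN_CONSECUTIVE_ROWS:
--                 return True
--         else:
--             consecutive_rows = 0
--     return False
--
-- def check_consecutive_ones(row):
--     max_consecutive = curr_consecutive = 0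
--     for item in row:
--         if item == 1:
--             curr_consecutive += 1
--             max_consecutive = max(max_consecutive, curr_consecutive)
--         else:
--             # Reset our consecutive ones
--             curr_consecutive = 0
--     return max_consecutive >= MIN_CONSECUTIVE_ONES
-- ===== SOURCE B (Python) =====
-- MIN_CONSECUTIVE_ROWS = 7
--
-- MIN_CONSECUTIVE_ONES = 7
--
-- def _window_any(flags):
--     # True iff some window of 7 consecutive positions is all True.
--     return any(all(flags[i + j] for j in range(7))
--                for i in range(len(flags) - 7 + 1))
--
-- def check_christmas_tree(board):
--     qualifying = [_window_any([item == 1 for item in row]) for row in board]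
--     return _window_any(qualifying)
-- ===== Notes on version B (the rewrite author's own statement) =====
-- stated objective: alternative
-- what changed: Replaced the streaming max/counter fold with early exit by a two-phase build-a-flag-table then brute-force sliding-window check (any window of 7 consecutive positions all set), used both per row and over rows.
import Mathlib
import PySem

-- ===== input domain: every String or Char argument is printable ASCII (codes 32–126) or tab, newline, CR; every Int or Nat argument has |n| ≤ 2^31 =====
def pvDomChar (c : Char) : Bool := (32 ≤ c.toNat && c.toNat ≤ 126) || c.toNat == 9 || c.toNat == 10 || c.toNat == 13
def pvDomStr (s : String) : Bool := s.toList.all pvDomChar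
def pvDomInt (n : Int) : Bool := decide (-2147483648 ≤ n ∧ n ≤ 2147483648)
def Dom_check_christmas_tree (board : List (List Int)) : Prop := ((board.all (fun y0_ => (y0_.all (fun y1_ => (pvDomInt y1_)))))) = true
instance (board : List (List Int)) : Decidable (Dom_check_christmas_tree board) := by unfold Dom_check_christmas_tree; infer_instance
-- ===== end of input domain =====

-- B replaces A's streaming counter fold (with early exit) by a two-phase table-then-sliding-window check; alternative structure, not faster.

-- ===== PORT A =====
-- check_consecutive_ones: fold carrying (max_consecutive, curr_consecutive)
def checkConsecutiveOnes (row : List Int) : Bool :=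
  (row.foldl
    (fun (p : Int × Int) item =>
      if item == 1 then (max p.1 (p.2 + 1), p.2 + 1) else (p.1, 0))
    (0, 0)).1 ≥ 7

-- the outer loop with its early return, carrying consecutive_rows
def goA : List (List Int) → Int → Bool
  | [], _ => false
  | r :: rs, c =>
    if checkConsecutiveOnes r then
      (if c + 1 ≥ 7 then true else goA rs (c + 1))
    else goA rs 0

def check_christmas_tree (board : List (List Int)) : Bool := goA board 0

-- ===== PORT B =====
-- _window_any: range(len-7+1) is empty in Python when len < 7; Nat `length + 1 - 7` is 0 there, matching.
def windowAny (flags : List Bool) : Bool :=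
  (List.range (flags.length + 1 - 7)).any fun i =>
    (List.range 7).all fun j => flags.getD (i + j) false

def check_christmas_tree_alt (board : List (List Int)) : Bool :=
  let qualifying := board.map (fun row => windowAny (row.map (fun item => item == 1)))
  windowAny qualifying

-- ===== PRECONDITION & SPEC =====
def Spec_check_christmas_tree (board : List (List Int)) (out : Bool) : Prop := out = check_christmas_tree_alt board
instance (board : List (List Int)) (out : Bool) : Decidable (Spec_check_christmas_tree board out) := by unfold Spec_check_christmas_tree; infer_instance

-- ===== CLAIM (what is proved, stated in full; the proofs are below) =====
def Claim_equal_check_christmas_tree : Prop := ∀ (board : List (List Int)), Dom_check_christmas_tree board → Spec_check_christmas_tree board (check_christmas_tree board)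

-- ===== LEMMAS AND PROOFS =====

-- "some window of 7 consecutive positions of bs is all true"
def Run7 (bs : List Bool) : Prop :=
  ∃ i, i + 7 ≤ bs.length ∧ ∀ j, j < 7 → bs.getD (i + j) false = true

theorem windowAny_iff (bs : List Bool) : windowAny bs = true ↔ Run7 bs := by
  unfold windowAny Run7
  simp only [List.any_eq_true, List.all_eq_true, List.mem_range]
  constructor
  · rintro ⟨i, hi, h⟩; exact ⟨i, by omega, fun j hj => h j hj⟩
  · rintro ⟨i, hi, h⟩; exact ⟨i, by omega, fun j hj => h j hj⟩

theorem run7_of_prefix (c : Nat) (bs : List Bool) (hc : 7 ≤ c) :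
    Run7 (List.replicate c true ++ bs) := by
  refine ⟨0, by simp; omega, fun j hj => ?_⟩
  rw [List.getD_append _ _ _ _ (by simp; omega)]
  have hjc : j < c := by omega
  simp [List.getD, List.getElem?_replicate, if_pos hjc]

theorem run7_replicate (c : Nat) (hc : c < 7) : ¬ Run7 (List.replicate c true) := by
  rintro ⟨i, hi, _⟩
  simp at hi; omega

theorem replicate_succ_append (c : Nat) (bs : List Bool) :
    List.replicate (c + 1) true ++ bs = List.replicate c true ++ true :: bs := by
  simp [List.replicate_succ', List.append_assoc]

theorem run7_split (c : Nat) (bs : List Bool) (hc : c < 7) :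
    Run7 (List.replicate c true ++ false :: bs) ↔ Run7 bs := by
  constructor
  · rintro ⟨i, hi, h⟩
    have hlen : (List.replicate c true ++ false :: bs).length = c + 1 + bs.length := by
      simp; omega
    rw [hlen] at hi
    -- the window cannot contain position c (which holds false)
    have hic : c + 1 ≤ i := by
      by_contra hlt
      have hjlt : c - i < 7 := by omega
      have := h (c - i) hjlt
      rw [show i + (c - i) = c by omega,
        List.getD_append_right _ _ _ _ (by simp)] at this
      simp at this
    refine ⟨i - (c + 1), by omega, fun j hj => ?_⟩
    have := h j hj
    rw [List.getD_append_right _ _ _ _ (by simp; omega)] at this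
    simp only [List.length_replicate] at this
    rw [show i + j - c = (i - (c+1) + j) + 1 by omega, List.getD_cons_succ] at this
    exact this
  · rintro ⟨i, hi, h⟩
    refine ⟨c + 1 + i, by simp; omega, fun j hj => ?_⟩
    rw [List.getD_append_right _ _ _ _ (by simp; omega)]
    simp only [List.length_replicate]
    rw [show c + 1 + i + j - c = (i + j) + 1 by omega, List.getD_cons_succ]
    exact h j hj

-- the inner fold invariant
theorem fold_inv (row : List Int) : ∀ (mx cur : Int), 0 ≤ cur → cur ≤ mx →
    ((row.foldl
        (fun (p : Int × Int) item =>
          if item == 1 then (max p.1 (p.2 + 1), p.2 + 1) else (p.1, 0))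
        (mx, cur)).1 ≥ 7 ↔
      mx ≥ 7 ∨ Run7 (List.replicate cur.toNat true ++ row.map (fun item => item == 1))) := by
  induction row with
  | nil =>
    intro mx cur h0 hcm
    simp only [List.foldl_nil, List.map_nil, List.append_nil]
    constructor
    · intro h; exact Or.inl h
    · rintro (h | h)
      · exact h
      · by_cases hc : cur.toNat < 7
        · exact absurd h (run7_replicate cur.toNat hc)
        · omega
  | cons x xs ih =>
    intro mx cur h0 hcm
    simp only [List.foldl_cons, List.map_cons]
    by_cases hx : (x == 1) = true
    · rw [if_pos hx, hx, ih (max mx (cur + 1)) (cur + 1) (by omega) (le_max_right _ _),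
        show (cur + 1).toNat = cur.toNat + 1 from by omega, replicate_succ_append]
      constructor
      · rintro (h | h)
        · rcases (by omega : 7 ≤ mx ∨ mx < 7) with h7 | h7
          · exact Or.inl h7
          · refine Or.inr ?_
            have hpre := run7_of_prefix (cur.toNat + 1)
              (xs.map (fun item => item == 1)) (by omega)
            rwa [replicate_succ_append] at hpre
        · exact Or.inr h
      · rintro (h | h)
        · exact Or.inl (by omega)
        · exact Or.inr h
    · have hx' : (x == 1) = false := by revert hx; cases (x == 1) <;> simp
      rw [if_neg hx, hx', ih mx 0 le_rfl (by omega)]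
      simp only [Int.toNat_zero, List.replicate_zero, List.nil_append]
      rcases (by omega : 7 ≤ mx ∨ mx < 7) with h7 | h7
      · simp [h7]
      · rw [run7_split cur.toNat _ (by omega)]

theorem inner_iff (row : List Int) :
    checkConsecutiveOnes row = true ↔ Run7 (row.map (fun item => item == 1)) := by
  unfold checkConsecutiveOnes
  have h := fold_inv row 0 0 le_rfl le_rfl
  simp only [Int.toNat_zero, List.replicate_zero, List.nil_append] at h
  rw [decide_eq_true_iff, h]
  constructor
  · rintro (h7 | hr)
    · exact absurd h7 (by omega)
    · exact hr
  · exact Or.inr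

-- the outer loop invariant
theorem goA_iff (rows : List (List Int)) : ∀ (c : Int), 0 ≤ c → c < 7 →
    (goA rows c = true ↔
      Run7 (List.replicate c.toNat true ++ rows.map (fun r => checkConsecutiveOnes r))) := by
  induction rows with
  | nil =>
    intro c h0 h7
    simp only [goA, List.map_nil, List.append_nil]
    constructor
    · intro h; exact absurd h (by simp)
    · intro h; exact absurd h (run7_replicate c.toNat (by omega))
  | cons r rs ih =>
    intro c h0 h7
    simp only [goA, List.map_cons]
    by_cases hr : checkConsecutiveOnes r = true
    · rw [if_pos hr, hr]
      by_cases h6 : c + 1 ≥ 7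
      · rw [if_pos h6]
        constructor
        · intro _
          have hpre := run7_of_prefix (c.toNat + 1)
            (rs.map (fun r => checkConsecutiveOnes r)) (by omega)
          rwa [replicate_succ_append] at hpre
        · intro _; rfl
      · rw [if_neg h6, ih (c + 1) (by omega) (by omega),
          show (c + 1).toNat = c.toNat + 1 from by omega, replicate_succ_append]
    · have hr' : checkConsecutiveOnes r = false := by
        revert hr; cases checkConsecutiveOnes r <;> simp
      rw [if_neg hr, hr', ih 0 le_rfl (by omega)]
      simp only [Int.toNat_zero, List.replicate_zero, List.nil_append]
      exact (run7_split c.toNat _ (by omega)).symm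

-- ===== VERDICT (by name: the statement is the Claim_ definition above) =====
theorem check_christmas_tree_spec : Claim_equal_check_christmas_tree := by
  intro board _
  unfold Spec_check_christmas_tree check_christmas_tree check_christmas_tree_alt
  have hA := goA_iff board 0 le_rfl (by omega)
  simp only [Int.toNat_zero, List.replicate_zero, List.nil_append] at hA
  have hB := windowAny_iff (board.map (fun row => windowAny (row.map (fun item => item == 1))))
  rw [Bool.eq_iff_iff, hA, hB]
  have hmap : board.map (fun r => checkConsecutiveOnes r)
      = board.map (fun row => windowAny (row.map (fun item => item == 1))) := by
    apply List.map_congr_left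
    intro r _
    rw [Bool.eq_iff_iff, inner_iff, windowAny_iff]
  rw [hmap]
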